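-- pv_equiv track=rewrite | github.com/oldDanbi97/Algorithm | 코딩테스트_고득점_Kit/스택_큐/기능개발.py | solution
-- ===== SOURCE A (Python) =====
-- import math
--
-- def solution(progresses, speeds):
--     completion_period = [[idx, math.ceil((100-progress)/speed)] for idx, (progress, speed) in enumerate(zip(progresses, speeds))]
--     cnt = 0
--     answer = []
--     max_day = 0
--     for id, day in completion_period:
--         if cnt == 0:
--             cnt += 1
--             max_day = day
--         else:
--             if max_day >= day:
--                 cnt += 1
--             elif max_day < day:
--                 answer.append(cnt)
--                 cnt = 1
--                 max_day = day
--         if id == len(completion_period) - 1: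
--             answer.append(cnt)
--     return answer
-- ===== SOURCE B (Python) =====
-- def solution(progresses, speeds):
--     # FIFO queue of completion days; consume each batch with a nested loop.
--     queue = [-((p - 100) // s) for p, s in zip(progresses, speeds)]
--     answer = []
--     while queue:
--         anchor = queue.pop(0)
--         cnt = 1
--         while queue and queue[0] <= anchor:
--             queue.pop(0)
--             cnt += 1
--         answer.append(cnt)
--     return answer
-- ===== Notes on version B (the rewrite author's own statement) =====
-- stated objective: idiomatic
-- what changed: Replaces A's flat enumerate-indexed loop with sentinel counter, anchor variable and end-of-list flush by a queue: an outer loop pops the first completion day of each batch as anchor and an inner loop consumes every following day <= anchor, so no index bookkeeping or flush is needed; the ceiling is computed with exact integer division instead of float math.ceil.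
import Mathlib
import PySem

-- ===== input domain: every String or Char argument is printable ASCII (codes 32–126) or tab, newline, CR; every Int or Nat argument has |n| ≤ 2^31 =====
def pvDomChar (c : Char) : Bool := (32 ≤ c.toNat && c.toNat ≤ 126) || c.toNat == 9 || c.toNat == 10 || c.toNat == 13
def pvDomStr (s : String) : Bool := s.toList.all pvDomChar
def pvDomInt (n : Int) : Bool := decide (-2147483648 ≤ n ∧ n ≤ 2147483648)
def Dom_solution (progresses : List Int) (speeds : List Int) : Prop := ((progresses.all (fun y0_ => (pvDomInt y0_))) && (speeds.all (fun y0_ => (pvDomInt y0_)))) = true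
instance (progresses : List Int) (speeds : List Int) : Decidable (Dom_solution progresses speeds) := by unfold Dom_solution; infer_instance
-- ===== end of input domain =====

-- B = queue/batch decomposition: outer loop pops a batch anchor, inner loop consumes days ≤ anchor (idiomatic, no sentinel counter or end-of-list flush); return values proved equal wherever A returns (all speeds used by zip nonzero).

-- ===== PORT A =====
-- math.ceil((100-p)/s) ported exactly as -((p-100) // s): float division is exact enough
-- here (|100-p| ≤ 2^31+100 < 2^53), so Python's float ceil equals the integer ceiling on Dom.
def pyCeil100Div (p s : Int) : Int := -(PySem.Int.floordiv (p - 100) s)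

-- one iteration of A's for-loop: state (cnt, answer, max_day), element (id, day), n = len(completion_period)
def stepA (n : Int) (st : Int × List Int × Int) (pr : Int × Int) : Int × List Int × Int :=
  let (idv, day) := pr
  let (cnt, answer, maxDay) :=
    if st.1 = 0 then (st.1 + 1, st.2.1, day)
    else if st.2.2 ≥ day then (st.1 + 1, st.2.1, st.2.2)
    else if st.2.2 < day then (1, st.2.1 ++ [st.1], day)
    else (st.1, st.2.1, st.2.2)
  if idv = n - 1 then (cnt, answer ++ [cnt], maxDay) else (cnt, answer, maxDay)

def solution (progresses : List Int) (speeds : List Int) : List Int :=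
  let cp : List (Int × Int) :=
    (PySem.List.enumerate (progresses.zip speeds)).map (fun x => (x.1, pyCeil100Div x.2.1 x.2.2))
  ((cp.foldl (stepA (cp.length : Int)) (0, ([], 0))).2.1)

-- ===== PORT B =====
-- inner while: pop every front day ≤ anchor, counting (cnt accumulates); returns (cnt, rest of queue)
def consumeB (anchor : Int) (cnt : Int) : List Int → Int × List Int
  | [] => (cnt, [])
  | d :: rest => if d ≤ anchor then consumeB anchor (cnt + 1) rest else (cnt, d :: rest)

theorem consumeB_len (anchor cnt : Int) (xs : List Int) :
    (consumeB anchor cnt xs).2.length ≤ xs.length := by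
  induction xs generalizing cnt with
  | nil => simp [consumeB]
  | cons d rest ih =>
    simp only [consumeB]
    split
    · exact le_trans (ih _) (Nat.le_succ _)
    · simp

-- outer while: pop the batch anchor, consume its batch, emit cnt
def groupsB : List Int → List Int
  | [] => []
  | d :: rest =>
    let c := consumeB d 1 rest
    c.1 :: groupsB c.2
termination_by xs => xs.length
decreasing_by exact Nat.lt_succ_of_le (consumeB_len d 1 rest)

def solution_alt (progresses : List Int) (speeds : List Int) : List Int :=
  groupsB ((progresses.zip speeds).map (fun x => -(PySem.Int.floordiv (x.1 - 100) x.2)))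

-- ===== PRECONDITION & SPEC =====
-- Pre_: every speed actually used (zip truncates to the shorter list) is nonzero; A raises ZeroDivisionError otherwise.
def Pre_solution (progresses : List Int) (speeds : List Int) : Prop :=
  ∀ x ∈ progresses.zip speeds, x.2 ≠ 0
instance (progresses : List Int) (speeds : List Int) : Decidable (Pre_solution progresses speeds) := by unfold Pre_solution; infer_instance
def pvWitness_solution : List Int × List Int := ([93, 30, 55], [1, 30, 5])

def Spec_solution (progresses : List Int) (speeds : List Int) (out : List Int) : Prop := out = solution_alt progresses speeds
instance (progresses : List Int) (speeds : List Int) (out : List Int) : Decidable (Spec_solution progresses speeds out) := by unfold Spec_solution; infer_instance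

-- ===== CLAIM (what is proved, stated in full; the proofs are below) =====
def Claim_equal_solution : Prop := ∀ (progresses : List Int) (speeds : List Int), Dom_solution progresses speeds → Pre_solution progresses speeds → Spec_solution progresses speeds (solution progresses speeds)

-- ===== LEMMAS AND PROOFS =====

-- the rest of A's loop after the first batch opened: emits cnt and starts new batches, flushing at the end
def finishA : Int → Int → List Int → List Int
  | cnt, _, [] => [cnt]
  | cnt, anchor, d :: rest =>
    if anchor ≥ d then finishA (cnt + 1) anchor rest else cnt :: finishA 1 d rest

-- finishA is exactly consumeB + groupsB
theorem finishA_eq_groups (ds : List Int) : ∀ (cnt anchor : Int),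
    finishA cnt anchor ds = (consumeB anchor cnt ds).1 :: groupsB (consumeB anchor cnt ds).2 := by
  induction ds with
  | nil => intro cnt anchor; simp [finishA, consumeB, groupsB]
  | cons d rest ih =>
    intro cnt anchor
    by_cases h : d ≤ anchor
    · rw [finishA, if_pos (by omega), consumeB, if_pos h, ih]
    · rw [finishA, if_neg (by omega), consumeB, if_neg h, ih 1 d, groupsB]

-- A's fold over the enumerated tail, starting inside an open batch, equals finishA
theorem foldA_eq_finishA (ds : List Int) : ∀ (n k cnt anchor : Int) (acc : List Int),
    ds ≠ [] → 1 ≤ cnt → k + (ds.length : Int) = n →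
    ((PySem.List.enumerate ds k).foldl (stepA n) (cnt, (acc, anchor))).2.1
      = acc ++ finishA cnt anchor ds := by
  induction ds with
  | nil => intro _ _ _ _ _ h; exact absurd rfl h
  | cons d rest ih =>
    intro n k cnt anchor acc _ hcnt hk
    rw [PySem.List.enumerate_cons, List.foldl_cons]
    have hc : ¬ cnt = 0 := by omega
    by_cases h : anchor ≥ d
    · have hstep : stepA n (cnt, (acc, anchor)) (k, d) =
          if k = n - 1 then (cnt + 1, acc ++ [cnt + 1], anchor)
          else (cnt + 1, acc, anchor) := by
        simp [stepA, hc, h]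
      rw [hstep]
      conv_rhs => rw [finishA, if_pos h]
      rcases rest with _ | ⟨d2, rest2⟩
      · rw [if_pos (by simp at hk; omega)]
        simp [PySem.List.enumerate_nil, finishA]
      · rw [if_neg (by simp at hk ⊢; omega)]
        exact ih n (k + 1) (cnt + 1) anchor acc (by simp) (by omega) (by simp at hk ⊢; omega)
    · have hstep : stepA n (cnt, (acc, anchor)) (k, d) =
          if k = n - 1 then (1, (acc ++ [cnt]) ++ [1], d)
          else (1, acc ++ [cnt], d) := by
        have h' : anchor < d := by omega
        simp [stepA, hc, h, h']
      rw [hstep]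
      conv_rhs => rw [finishA, if_neg h]
      rcases rest with _ | ⟨d2, rest2⟩
      · rw [if_pos (by simp at hk; omega)]
        simp [PySem.List.enumerate_nil, finishA]
      · rw [if_neg (by simp at hk ⊢; omega),
          ih n (k + 1) 1 d (acc ++ [cnt]) (by simp) (by omega) (by simp at hk ⊢; omega),
          List.append_assoc]
        rfl

-- the enumerated/mapped list A folds over is the enumeration of B's plain days list
theorem cp_eq_enumerate_days (zs : List (Int × Int)) : ∀ (k : Int),
    (PySem.List.enumerate zs k).map (fun x => (x.1, pyCeil100Div x.2.1 x.2.2))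
      = PySem.List.enumerate (zs.map (fun x => -(PySem.Int.floordiv (x.1 - 100) x.2))) k := by
  induction zs with
  | nil => intro k; simp [PySem.List.enumerate_nil]
  | cons z rest ih =>
    intro k
    rw [List.map_cons, PySem.List.enumerate_cons, PySem.List.enumerate_cons, List.map_cons, ih]
    have : pyCeil100Div z.1 z.2 = -(PySem.Int.floordiv (z.1 - 100) z.2) := by
      simp [pyCeil100Div]
    rw [this]

-- ===== VERDICT (by name: the statement is the Claim_ definition above) =====
theorem solution_spec : Claim_equal_solution := by
  intro progresses speeds _ _
  show solution progresses speeds = solution_alt progresses speeds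
  simp only [solution, solution_alt]
  rw [cp_eq_enumerate_days, PySem.List.length_enumerate]
  generalize (progresses.zip speeds).map (fun x => -(PySem.Int.floordiv (x.1 - 100) x.2)) = ds
  rcases ds with _ | ⟨d, rest⟩
  · simp [PySem.List.enumerate_nil, groupsB]
  · rw [PySem.List.enumerate_cons, List.foldl_cons]
    have hstep0 : stepA ((d :: rest).length : Int) (0, ([], 0)) (0, d) =
        if (0 : Int) = ((d :: rest).length : Int) - 1 then (1, [1], d) else (1, [], d) := by
      simp only [stepA]
      split <;> rfl
    rw [hstep0]
    rcases rest with _ | ⟨d2, rest2⟩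
    · rw [if_pos (by simp)]
      simp [PySem.List.enumerate_nil, groupsB, consumeB]
    · rw [if_neg (by simp; omega)]
      rw [show (0 : Int) + 1 = 1 from rfl]
      rw [foldA_eq_finishA (d2 :: rest2) ((d :: d2 :: rest2).length : Int) 1 1 d []
        (by simp) (by omega) (by simp; omega)]
      rw [List.nil_append, finishA_eq_groups, groupsB]
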